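-- pv_equiv track=rewrite | github.com/OsvaldoRodriguez/LAB-131-ESTRUCTURA-DE-DATOS-EN-PYTHON | recursividad_a.py | sumando_primos
-- ===== SOURCE A (Python) =====
-- def es_primo(n):
--     if n <= 1:
--         return False
--     for i in range(2, int(n**0.5) + 1):
--         if n % i == 0:
--             return False
--     return True
--
-- def sumando_primos(vector, indice):
--     if indice < 0:
--         return 0
--
--     elemento = vector[indice]
--     if es_primo(elemento):
--         return elemento + sumando_primos(vector, indice - 1)
--     else:
--         return sumando_primos(vector, indice - 1)
-- ===== SOURCE B (Python) =====
-- def es_primo(n):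
--     if n <= 1:
--         return False
--     for i in range(2, int(n**0.5) + 1):
--         if n % i == 0:
--             return False
--     return True
--
-- def sumando_primos(vector, indice):
--     total = 0
--     for i in range(indice, -1, -1):
--         x = vector[i]
--         if es_primo(x):
--             total += x
--     return total
-- ===== Notes on version B (the rewrite author's own statement) =====
-- stated objective: simpler
-- what changed: Replaced the O(n)-deep recursion of sumando_primos with an explicit countdown loop over range(indice, -1, -1) accumulating the total (es_primo unchanged); no recursion-depth limit.
-- outside the precondition, e.g. on sumando_primos([2, 3], 5): A raises IndexError, B raises IndexError
import Mathlib
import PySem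

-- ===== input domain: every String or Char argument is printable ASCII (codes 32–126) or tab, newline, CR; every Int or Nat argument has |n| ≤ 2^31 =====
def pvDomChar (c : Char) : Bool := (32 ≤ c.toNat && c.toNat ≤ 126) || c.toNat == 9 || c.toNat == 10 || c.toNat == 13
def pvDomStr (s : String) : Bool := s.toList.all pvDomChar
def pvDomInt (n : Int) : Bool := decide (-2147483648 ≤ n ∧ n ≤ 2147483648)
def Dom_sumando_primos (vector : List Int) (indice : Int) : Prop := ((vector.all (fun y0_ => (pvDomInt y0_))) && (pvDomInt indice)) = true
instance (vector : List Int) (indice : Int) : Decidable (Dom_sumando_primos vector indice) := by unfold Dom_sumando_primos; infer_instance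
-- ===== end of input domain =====

-- B replaces A's deep recursion by an explicit countdown loop accumulating the sum (simpler; same cost).


-- ===== PORT A =====
-- es_primo: 'int(n**0.5)' is exact as Nat.sqrt on the stated domain (|n| ≤ 2^31, where the
-- double sqrt is correctly rounded and never reaches the next integer); loop with early
-- 'return False' ported as short-circuiting List.all.
def es_primo (n : Int) : Bool :=
  if n ≤ 1 then false
  else (PySem.List.pyRange 2 ((Nat.sqrt n.toNat : Int) + 1) 1).all
        (fun i => !(PySem.Int.mod n i == 0))

-- vector[indice]: IndexError (indice ≥ len) is excluded by Pre_; getD 0 is never the value used there.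
def sumando_primos (vector : List Int) (indice : Int) : Int :=
  if h : indice < 0 then 0
  else
    let elemento := PySem.List.pyGetD vector indice 0
    if es_primo elemento then elemento + sumando_primos vector (indice - 1)
    else sumando_primos vector (indice - 1)
termination_by (indice + 1).toNat
decreasing_by all_goals omega

-- ===== PORT B =====
def sumando_primos_alt (vector : List Int) (indice : Int) : Int :=
  (PySem.List.pyRange indice (-1) (-1)).foldl
    (fun total i =>
      let x := PySem.List.pyGetD vector i 0
      if es_primo x then total + x else total) 0

-- ===== PRECONDITION & SPEC =====
-- Pre_ excludes exactly the IndexError inputs: Python A raises when indice ≥ len(vector).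
def Pre_sumando_primos (vector : List Int) (indice : Int) : Prop := indice < (vector.length : Int)
instance (vector : List Int) (indice : Int) : Decidable (Pre_sumando_primos vector indice) := by unfold Pre_sumando_primos; infer_instance
def pvWitness_sumando_primos : List Int × Int := ([2, 3, 4, 5], 3)

def Spec_sumando_primos (vector : List Int) (indice : Int) (out : Int) : Prop := out = sumando_primos_alt vector indice
instance (vector : List Int) (indice : Int) (out : Int) : Decidable (Spec_sumando_primos vector indice out) := by unfold Spec_sumando_primos; infer_instance

-- ===== CLAIM (what is proved, stated in full; the proofs are below) =====
def Claim_equal_sumando_primos : Prop := ∀ (vector : List Int) (indice : Int), Dom_sumando_primos vector indice → Pre_sumando_primos vector indice → Spec_sumando_primos vector indice (sumando_primos vector indice)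

-- ===== LEMMAS AND PROOFS =====

-- B's loop body: the accumulator splits off additively.
theorem foldl_body_shift (vector : List Int) (l : List Int) (a : Int) :
    l.foldl (fun total i =>
      let x := PySem.List.pyGetD vector i 0
      if es_primo x then total + x else total) a
    = a + l.foldl (fun total i =>
      let x := PySem.List.pyGetD vector i 0
      if es_primo x then total + x else total) 0 := by
  induction l generalizing a with
  | nil => simp
  | cons hd tl ih =>
    simp only [List.foldl_cons]
    rw [ih, ih (if es_primo (PySem.List.pyGetD vector hd 0) then 0 + PySem.List.pyGetD vector hd 0 else 0)]
    split <;> ring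

-- A's recursion equals B's loop, for every indice (both are 0 on negative indice and read
-- the same positions otherwise).
theorem agree (vector : List Int) (indice : Int) :
    sumando_primos vector indice = sumando_primos_alt vector indice := by
  by_cases h : indice < 0
  · rw [sumando_primos]
    simp [h, sumando_primos_alt, PySem.List.pyRange_neg_one_eq_nil (by omega : indice ≤ (-1 : Int))]
  · have hrec := agree vector (indice - 1)
    rw [sumando_primos]
    simp only [h, dif_neg, not_false_iff]
    unfold sumando_primos_alt
    rw [PySem.List.pyRange_neg_one_cons (by omega : (-1 : Int) < indice),
        List.foldl_cons, foldl_body_shift]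
    unfold sumando_primos_alt at hrec
    rw [← hrec]
    by_cases h2 : es_primo (PySem.List.pyGetD vector indice 0)
    · simp only [h2, if_true]; ring
    · simp only [h2, Bool.false_eq_true, if_false]; ring
termination_by (indice + 1).toNat
decreasing_by omega

-- ===== VERDICT (by name: the statement is the Claim_ definition above) =====
theorem sumando_primos_spec : Claim_equal_sumando_primos := by
  intro vector indice _ _
  unfold Spec_sumando_primos
  exact agree vector indice
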